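-- pv_equiv track=rewrite | github.com/Evil0ctal/SimpleTweakEditor | src/utils/file_operations.py | validate_control_file
-- ===== SOURCE A (Python) =====
-- def validate_control_file(control_content):
--     """
--     验证control文件格式
--
--     Args:
--         control_content: control文件内容
--
--     Returns:
--         tuple: (是否有效, 错误消息列表)
--     """
--     errors = []
--
--     # 检查必填字段
--     required_fields = ["Package", "Version", "Architecture", "Description"]
--     missing_fields = []
--
--     for field in required_fields:
--         if not any(line.startswith(f"{field}:") for line in control_content.splitlines()):
--             missing_fields.append(field)
--
--     if missing_fields:
--         errors.append(f"Missing required fields: {', '.join(missing_fields)}")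
--
--     # 检查字段格式
--     for line_num, line in enumerate(control_content.splitlines(), 1):
--         if line and not line.startswith(" ") and ":" not in line:
--             errors.append(f"Line {line_num}: Invalid field format: '{line}'")
--
--     return len(errors) == 0, errors
-- ===== SOURCE B (Python) =====
-- def validate_control_file(control_content):
--     """Single pass over the lines: collect field names (prefix before the first
--     ':') into a set and the per-line format errors; then compute the missing
--     required fields by one set lookup per field."""
--     required_fields = ["Package", "Version", "Architecture", "Description"]
--     present = set()
--     format_errors = []
--     for line_num, line in enumerate(control_content.splitlines(), 1):
--         head, sep, _tail = line.partition(":")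
--         if sep:
--             present.add(head)
--         elif line and not line.startswith(" "):
--             format_errors.append(f"Line {line_num}: Invalid field format: '{line}'")
--     missing_fields = [f for f in required_fields if f not in present]
--     errors = []
--     if missing_fields:
--         errors.append(f"Missing required fields: {', '.join(missing_fields)}")
--     errors.extend(format_errors)
--     return not errors, errors
-- ===== Notes on version B (the rewrite author's own statement) =====
-- stated objective: simpler
-- what changed: A scans all lines once per required field (four any() passes plus a separate format loop); B makes a single pass over the enumerated lines that collects each line's key (prefix before the first ':', via partition) into a set and gathers format errors, then checks the four required fields by one set lookup each.
import Mathlib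
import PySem

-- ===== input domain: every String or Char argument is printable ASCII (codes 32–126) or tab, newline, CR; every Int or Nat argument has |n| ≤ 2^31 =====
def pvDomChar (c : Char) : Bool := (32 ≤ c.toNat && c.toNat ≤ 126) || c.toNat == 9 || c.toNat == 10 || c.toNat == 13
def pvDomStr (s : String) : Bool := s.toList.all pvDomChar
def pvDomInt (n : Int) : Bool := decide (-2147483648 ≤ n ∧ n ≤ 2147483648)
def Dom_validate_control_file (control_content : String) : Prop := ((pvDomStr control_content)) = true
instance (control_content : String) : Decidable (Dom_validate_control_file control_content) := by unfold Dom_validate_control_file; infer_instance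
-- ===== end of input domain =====

-- B replaces A's four whole-file scans (one `any` per required field) by ONE pass over the
-- lines that collects the field names into a set, then one lookup per required field: simpler.

-- the f-string "Line {line_num}: Invalid field format: '{line}'" (identical in A and B)
def pvFmtMsg (p : Int × String) : String :=
  "Line " ++ PySem.Int.toStr p.1 ++ ": Invalid field format: '" ++ p.2 ++ "'"

-- ===== PORT A =====
def validate_control_file (control_content : String) : Bool × List String :=
  let lines := PySem.Str.splitlines control_content
  -- for field in required_fields: if not any(line.startswith(f"{field}:") …): missing_fields.append(field)
  let missing_fields := ["Package", "Version", "Architecture", "Description"].foldl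
    (fun acc f => if lines.any (fun l => PySem.Str.startswith l (f ++ ":")) then acc else acc ++ [f]) []
  let errors := if missing_fields ≠ ([] : List String) then
      ["Missing required fields: " ++ PySem.Str.join ", " missing_fields] else []
  -- for line_num, line in enumerate(…, 1): if line and not line.startswith(" ") and ":" not in line: …
  let errors := (PySem.List.enumerate lines 1).foldl
    (fun acc p => if p.2 ≠ "" ∧ ¬ PySem.Str.startswith p.2 " " = true ∧ PySem.Str.isIn ":" p.2 = false
      then acc ++ [pvFmtMsg p] else acc) errors
  (errors.length == 0, errors)

-- ===== PORT B =====
def validate_control_file_alt (control_content : String) : Bool × List String :=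
  let lines := PySem.Str.splitlines control_content
  -- single loop: line.partition(":") ported by hand (exact for the 1-char separator ":"):
  -- head = characters before the first ':', sep is nonempty iff ':' occurs in the line
  let st := (PySem.List.enumerate lines 1).foldl
    (fun (st : PySem.Set String × List String) p =>
      let head := String.ofList (p.2.toList.takeWhile (fun c => c ≠ ':'))
      if p.2.toList.contains ':' then (st.1.add head, st.2)
      else if p.2 ≠ "" ∧ ¬ PySem.Str.startswith p.2 " " = true then (st.1, st.2 ++ [pvFmtMsg p])
      else st)
    (PySem.Set.empty, [])
  let missing_fields := ["Package", "Version", "Architecture", "Description"].filter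
    (fun f => !(PySem.Set.contains st.1 f))
  let errors := (if missing_fields.isEmpty then [] else
      ["Missing required fields: " ++ PySem.Str.join ", " missing_fields]) ++ st.2
  (errors.isEmpty, errors)

-- ===== PRECONDITION & SPEC =====
def Spec_validate_control_file (control_content : String) (out : Bool × List String) : Prop := out = validate_control_file_alt control_content
instance (control_content : String) (out : Bool × List String) : Decidable (Spec_validate_control_file control_content out) := by unfold Spec_validate_control_file; infer_instance

-- ===== CLAIM (what is proved, stated in full; the proofs are below) =====
def Claim_equal_validate_control_file : Prop := ∀ (control_content : String), Dom_validate_control_file control_content → Spec_validate_control_file control_content (validate_control_file control_content)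

-- ===== LEMMAS AND PROOFS =====

-- the per-line state update of B's single loop, and its two projections
def pvStep (st : PySem.Set String × List String) (p : Int × String) : PySem.Set String × List String :=
  let head := String.ofList (p.2.toList.takeWhile (fun c => c ≠ ':'))
  if p.2.toList.contains ':' then (st.1.add head, st.2)
  else if p.2 ≠ "" ∧ ¬ PySem.Str.startswith p.2 " " = true then (st.1, st.2 ++ [pvFmtMsg p])
  else st

def pvAddKey (s : PySem.Set String) (l : String) : PySem.Set String :=
  if l.toList.contains ':' then s.add (String.ofList (l.toList.takeWhile (fun c => c ≠ ':'))) else s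

-- B's paired fold splits into a set-fold over the lines and an error-fold over the enumeration
lemma pvFold_split (ls : List String) (n : Int) (s : PySem.Set String) (e : List String) :
    (PySem.List.enumerate ls n).foldl pvStep (s, e)
      = (ls.foldl pvAddKey s,
         (PySem.List.enumerate ls n).foldl
           (fun acc p => if ¬ p.2.toList.contains ':' = true
               ∧ p.2 ≠ "" ∧ ¬ PySem.Str.startswith p.2 " " = true then acc ++ [pvFmtMsg p] else acc) e) := by
  induction ls generalizing n s e with
  | nil => simp [PySem.List.enumerate_nil]
  | cons l ls ih =>
    rw [PySem.List.enumerate_cons]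
    simp only [List.foldl_cons, ih]
    unfold pvStep pvAddKey
    by_cases hc : l.toList.contains ':' = true <;> simp only [hc] <;> split_ifs <;> simp_all

lemma pv_mem_addKey_fold (ls : List String) (s : PySem.Set String) (f : String) :
    f ∈ ls.foldl pvAddKey s
      ↔ f ∈ s ∨ ∃ l ∈ ls, l.toList.contains ':' = true
          ∧ l.toList.takeWhile (fun c => c ≠ ':') = f.toList := by
  induction ls generalizing s with
  | nil => simp
  | cons l ls ih =>
    simp only [List.foldl_cons, ih]
    unfold pvAddKey
    by_cases hc : l.toList.contains ':' = true
    · simp only [hc, if_pos]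
      rw [PySem.Set.mem_add]
      constructor
      · rintro (⟨h | h⟩ | h)
        · exact Or.inl h
        · exact Or.inr ⟨l, by simp, hc, by rw [h]; simp⟩
        · rcases h with ⟨m, hm, h1, h2⟩; exact Or.inr ⟨m, by simp [hm], h1, h2⟩
      · rintro (h | ⟨m, hm, h1, h2⟩)
        · exact Or.inl (Or.inl h)
        · rcases List.mem_cons.mp hm with rfl | hm
          · refine Or.inl (Or.inr ?_)
            apply String.toList_injective; simpa using h2.symm
          · exact Or.inr ⟨m, hm, h1, h2⟩
    · simp only [hc, if_neg, Bool.false_eq_true, not_false_iff]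
      constructor
      · rintro (h | ⟨m, hm, h1, h2⟩)
        · exact Or.inl h
        · exact Or.inr ⟨m, by simp [hm], h1, h2⟩
      · rintro (h | ⟨m, hm, h1, h2⟩)
        · exact Or.inl h
        · rcases List.mem_cons.mp hm with rfl | hm
          · exact absurd h1 hc
          · exact Or.inr ⟨m, hm, h1, h2⟩

lemma pv_takeWhile_of_no_colon (cs rest : List Char) (h : ':' ∉ cs) :
    (cs ++ ':' :: rest).takeWhile (fun c => c ≠ ':') = cs := by
  induction cs with
  | nil => simp
  | cons c cs ih =>
    simp only [List.mem_cons, not_or] at h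
    have hc : c ≠ ':' := fun e => h.1 e.symm
    simp only [List.cons_append, List.takeWhile_cons, hc, decide_not, decide_false, Bool.not_false, if_true, List.cons.injEq, true_and]
    simpa using ih h.2

lemma pv_dropWhile_colon (cs : List Char) (h : ':' ∈ cs) :
    ∃ t, cs.dropWhile (fun c => c ≠ ':') = ':' :: t := by
  induction cs with
  | nil => simp at h
  | cons c cs ih =>
    by_cases hc : c = ':'
    · exact ⟨cs, by simp [hc]⟩
    · rcases List.mem_cons.mp h with h' | h'
      · exact absurd h'.symm hc
      · rcases ih h' with ⟨t, ht⟩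
        refine ⟨t, ?_⟩
        rw [List.dropWhile_cons]
        simp only [hc, decide_not, decide_false, Bool.not_false, if_true]
        simpa using ht

-- startswith(f"{field}:") characterised via partition, for a field name without ':'
lemma pv_startswith_iff (f l : String) (hf : ':' ∉ f.toList) :
    PySem.Str.startswith l (f ++ ":") = true
      ↔ l.toList.contains ':' = true ∧ l.toList.takeWhile (fun c => c ≠ ':') = f.toList := by
  rw [PySem.Str.startswith_eq, PySem.Chars.startswith_iff]
  have htl : (f ++ ":").toList = f.toList ++ [':'] := by
    rw [String.toList_append]; rfl
  rw [htl]
  constructor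
  · rintro ⟨t, ht⟩
    have hl : l.toList = f.toList ++ ':' :: t := by rw [← ht]; simp
    constructor
    · simp [hl]
    · rw [hl, pv_takeWhile_of_no_colon _ _ hf]
  · rintro ⟨hc, htw⟩
    rcases pv_dropWhile_colon l.toList (List.contains_iff_mem.mp hc) with ⟨t, ht⟩
    refine ⟨t, ?_⟩
    have := List.takeWhile_append_dropWhile (p := fun c => c ≠ ':') (l := l.toList)
    rw [htw, ht] at this
    simpa using this

lemma pv_any_eq_contains (ls : List String) (f : String) (hf : ':' ∉ f.toList) :
    ls.any (fun l => PySem.Str.startswith l (f ++ ":"))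
      = PySem.Set.contains (ls.foldl pvAddKey PySem.Set.empty) f := by
  by_cases h : ∃ l ∈ ls, l.toList.contains ':' = true
      ∧ l.toList.takeWhile (fun c => c ≠ ':') = f.toList
  · have h1 : ls.any (fun l => PySem.Str.startswith l (f ++ ":")) = true := by
      rcases h with ⟨l, hl, h1, h2⟩
      exact List.any_eq_true.mpr ⟨l, hl, (pv_startswith_iff f l hf).mpr ⟨h1, h2⟩⟩
    have h2 : PySem.Set.contains (ls.foldl pvAddKey PySem.Set.empty) f = true := by
      rw [PySem.Set.contains_iff, pv_mem_addKey_fold]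
      exact Or.inr h
    rw [h1, h2]
  · have h1 : ls.any (fun l => PySem.Str.startswith l (f ++ ":")) = false := by
      rw [List.any_eq_false]
      intro l hl hsw
      exact h ⟨l, hl, (pv_startswith_iff f l hf).mp hsw⟩
    have h2 : PySem.Set.contains (ls.foldl pvAddKey PySem.Set.empty) f = false := by
      rw [Bool.eq_false_iff]
      intro hcon
      rcases (pv_mem_addKey_fold ls PySem.Set.empty f).mp (PySem.Set.contains_iff _ _ |>.mp hcon) with h' | h'
      · simp [PySem.Set.empty] at h'
      · exact h h'
    rw [h1, h2]

-- ":" not in line  ⟷  the hand-ported partition separator test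
lemma pv_isIn_colon (l : String) : PySem.Str.isIn ":" l = l.toList.contains ':' := by
  by_cases h : ':' ∈ l.toList
  · have h1 : PySem.Str.isIn ":" l = true := by
      rw [PySem.Str.isIn_iff_infix]
      exact (List.singleton_infix_iff ':' l.toList).mpr h
    rw [h1, List.contains_iff_mem.mpr h]
  · have h1 : PySem.Str.isIn ":" l = false := by
      rw [Bool.eq_false_iff]
      intro hc
      exact h ((List.singleton_infix_iff ':' l.toList).mp (PySem.Str.isIn_iff_infix _ _ |>.mp hc))
    rw [h1]
    simpa [List.contains_iff_mem] using h

-- len(errors) == 0 is the emptiness test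
lemma pv_len_beq {α : Type} (l : List α) : (l.length == 0) = l.isEmpty := by
  cases l <;> rfl

-- ===== VERDICT (by name: the statement is the Claim_ definition above) =====
set_option maxHeartbeats 2000000 in
theorem validate_control_file_spec : Claim_equal_validate_control_file := by
  intro c _
  unfold Spec_validate_control_file validate_control_file validate_control_file_alt
  simp only []
  set ls := PySem.Str.splitlines c with hls
  -- B's paired fold, split into components
  have hsplit := pvFold_split ls 1 PySem.Set.empty []
  have hstep : (fun (st : PySem.Set String × List String) (p : Int × String) =>
      let head := String.ofList (p.2.toList.takeWhile (fun c => c ≠ ':'))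
      if p.2.toList.contains ':' then (st.1.add head, st.2)
      else if p.2 ≠ "" ∧ ¬ PySem.Str.startswith p.2 " " = true then (st.1, st.2 ++ [pvFmtMsg p])
      else st) = pvStep := rfl
  rw [hstep, hsplit]
  -- the four fields agree: any-scan = set lookup
  have hmiss : (["Package", "Version", "Architecture", "Description"] : List String).foldl
      (fun acc f => if ls.any (fun l => PySem.Str.startswith l (f ++ ":")) then acc else acc ++ [f]) []
      = (["Package", "Version", "Architecture", "Description"] : List String).filter
          (fun f => !(PySem.Set.contains (ls.foldl pvAddKey PySem.Set.empty) f)) := by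
    have h1 := pv_any_eq_contains ls "Package" (by decide)
    have h2 := pv_any_eq_contains ls "Version" (by decide)
    have h3 := pv_any_eq_contains ls "Architecture" (by decide)
    have h4 := pv_any_eq_contains ls "Description" (by decide)
    simp only [List.foldl_cons, List.foldl_nil, List.filter, h1, h2, h3, h4]
    cases PySem.Set.contains (ls.foldl pvAddKey PySem.Set.empty) "Package" <;>
    cases PySem.Set.contains (ls.foldl pvAddKey PySem.Set.empty) "Version" <;>
    cases PySem.Set.contains (ls.foldl pvAddKey PySem.Set.empty) "Architecture" <;>
    cases PySem.Set.contains (ls.foldl pvAddKey PySem.Set.empty) "Description" <;> rfl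
  rw [hmiss]
  set missing := (["Package", "Version", "Architecture", "Description"] : List String).filter
      (fun f => !(PySem.Set.contains (ls.foldl pvAddKey PySem.Set.empty) f)) with hm
  -- the two format-error folds have pointwise-equal conditions; flatten both with foldl_append_if
  have hcondA : ∀ (acc : List String) (p : Int × String),
      (if p.2 ≠ "" ∧ ¬ PySem.Str.startswith p.2 " " = true ∧ PySem.Str.isIn ":" p.2 = false
        then acc ++ [pvFmtMsg p] else acc)
      = (if (decide (p.2 ≠ "") && !PySem.Str.startswith p.2 " " && !p.2.toList.contains ':') = true
        then acc ++ [pvFmtMsg p] else acc) := by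
    intro acc p
    rw [pv_isIn_colon]
    split_ifs with ha hb hb <;> simp_all
  have hcondB : ∀ (acc : List String) (p : Int × String),
      (if ¬ p.2.toList.contains ':' = true ∧ p.2 ≠ "" ∧ ¬ PySem.Str.startswith p.2 " " = true
        then acc ++ [pvFmtMsg p] else acc)
      = (if (decide (p.2 ≠ "") && !PySem.Str.startswith p.2 " " && !p.2.toList.contains ':') = true
        then acc ++ [pvFmtMsg p] else acc) := by
    intro acc p
    split_ifs with ha hb hb <;> simp_all
  have hA : ∀ (e : List String), (PySem.List.enumerate ls 1).foldl
      (fun acc p => if p.2 ≠ "" ∧ ¬ PySem.Str.startswith p.2 " " = true ∧ PySem.Str.isIn ":" p.2 = false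
        then acc ++ [pvFmtMsg p] else acc) e
      = e ++ ((PySem.List.enumerate ls 1).filter
          (fun p => decide (p.2 ≠ "") && !PySem.Str.startswith p.2 " " && !p.2.toList.contains ':')).map pvFmtMsg := by
    intro e
    have hf : (fun (acc : List String) (p : Int × String) =>
        if p.2 ≠ "" ∧ ¬ PySem.Str.startswith p.2 " " = true ∧ PySem.Str.isIn ":" p.2 = false
        then acc ++ [pvFmtMsg p] else acc)
      = (fun acc p => if (decide (p.2 ≠ "") && !PySem.Str.startswith p.2 " " && !p.2.toList.contains ':') = true
        then acc ++ [pvFmtMsg p] else acc) := by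
      funext acc p; exact hcondA acc p
    rw [hf, PySem.List.foldl_append_if]
  have hB : (PySem.List.enumerate ls 1).foldl
      (fun acc p => if ¬ p.2.toList.contains ':' = true ∧ p.2 ≠ "" ∧ ¬ PySem.Str.startswith p.2 " " = true
        then acc ++ [pvFmtMsg p] else acc) ([] : List String)
      = ((PySem.List.enumerate ls 1).filter
          (fun p => decide (p.2 ≠ "") && !PySem.Str.startswith p.2 " " && !p.2.toList.contains ':')).map pvFmtMsg := by
    have hf : (fun (acc : List String) (p : Int × String) =>
        if ¬ p.2.toList.contains ':' = true ∧ p.2 ≠ "" ∧ ¬ PySem.Str.startswith p.2 " " = true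
        then acc ++ [pvFmtMsg p] else acc)
      = (fun acc p => if (decide (p.2 ≠ "") && !PySem.Str.startswith p.2 " " && !p.2.toList.contains ':') = true
        then acc ++ [pvFmtMsg p] else acc) := by
      funext acc p; exact hcondB acc p
    rw [hf, PySem.List.foldl_append_if, List.nil_append]
  rw [hA, hB]
  -- the base error list and the final boolean
  cases missing with
  | nil => simp [pv_len_beq]
  | cons m ms =>
    simp only [ne_eq, reduceCtorEq, not_false_iff, if_pos, List.isEmpty_cons, Bool.false_eq_true,
      if_neg, List.cons_append, List.nil_append]
    simp
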